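-- pv_equiv track=rewrite | github.com/BatuhanT-96/DB-Script-Run3 | scripts/validate_postgres_schema.py | is_schema_qualified
-- ===== SOURCE A (Python) =====
-- def is_schema_qualified(identifier: str) -> bool:
--     token = identifier.strip()
--     in_quotes = False
--     for ch in token:
--         if ch == '"':
--             in_quotes = not in_quotes
--         elif ch == "." and not in_quotes:
--             return True
--     return False
-- ===== SOURCE B (Python) =====
-- def is_schema_qualified(identifier: str) -> bool:
--     parts = identifier.strip().split('"')
--     return any('.' in seg for i, seg in enumerate(parts) if i % 2 == 0)
-- ===== Notes on version B (the rewrite author's own statement) =====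
-- stated objective: idiomatic
-- what changed: Replaces the char-by-char quote-state toggle loop with split on the double-quote character and a scan of the even-indexed (outside-quotes) segments for a dot.
import Mathlib
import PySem

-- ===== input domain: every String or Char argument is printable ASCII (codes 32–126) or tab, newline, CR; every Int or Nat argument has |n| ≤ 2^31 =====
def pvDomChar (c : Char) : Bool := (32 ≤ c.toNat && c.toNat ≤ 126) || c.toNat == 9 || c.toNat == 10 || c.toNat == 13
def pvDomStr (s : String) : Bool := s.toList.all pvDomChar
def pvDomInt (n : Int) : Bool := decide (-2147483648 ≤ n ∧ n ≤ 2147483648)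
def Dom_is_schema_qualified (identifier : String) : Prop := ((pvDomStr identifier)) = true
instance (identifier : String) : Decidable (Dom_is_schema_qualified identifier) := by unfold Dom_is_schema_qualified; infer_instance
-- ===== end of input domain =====

-- B: idiomatic re-decomposition — split the stripped token on '"' and test the even-indexed
-- (outside-quotes) segments for a dot, instead of A's char-by-char quote-state toggle.

-- ===== PORT A =====
-- the for-loop with its in_quotes flag, as structural recursion over the chars
def isqLoop : List Char → Bool → Bool
  | [], _ => false
  | ch :: rest, inQuotes =>
    if ch == '"' then isqLoop rest (!inQuotes)
    else if ch == '.' && !inQuotes then true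
    else isqLoop rest inQuotes

def is_schema_qualified (identifier : String) : Bool :=
  isqLoop (PySem.Str.strip identifier).toList false

-- ===== PORT B =====
-- str.split('"') with a one-char separator is List.splitOn '"'; `'.' in seg` is
-- PySem.Chars.isIn ['.']; `any(... for i, seg in enumerate(parts) if i % 2 == 0)`
def is_schema_qualified_alt (identifier : String) : Bool :=
  let parts := ((PySem.Str.strip identifier).toList.splitOn '"')
  (PySem.List.enumerate parts).any (fun p => p.1 % 2 == 0 && PySem.Chars.isIn ['.'] p.2)

-- ===== PRECONDITION & SPEC =====
def Spec_is_schema_qualified (identifier : String) (out : Bool) : Prop := out = is_schema_qualified_alt identifier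
instance (identifier : String) (out : Bool) : Decidable (Spec_is_schema_qualified identifier out) := by unfold Spec_is_schema_qualified; infer_instance

-- ===== CLAIM (what is proved, stated in full; the proofs are below) =====
def Claim_equal_is_schema_qualified : Prop := ∀ (identifier : String), Dom_is_schema_qualified identifier → Spec_is_schema_qualified identifier (is_schema_qualified identifier)

-- ===== LEMMAS AND PROOFS =====

-- ===== VERDICT (by name: the statement is the Claim_ definition above) =====
-- chk parts q: B's even/odd alternation written as a recursion matching A's loop shape
def chk : List (List Char) → Bool → Bool
  | [], _ => false
  | s :: rest, q => (!q && s.contains '.') || chk rest (!q)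

theorem isIn_dot (s : List Char) : PySem.Chars.isIn ['.'] s = s.contains '.' := by
  rcases h : PySem.Chars.isIn ['.'] s with _|_
  · rw [PySem.Chars.isIn_eq_false_iff] at h
    simp [List.singleton_infix_iff] at h ⊢; simpa using h
  · rw [PySem.Chars.isIn_iff_infix] at h
    simp [List.singleton_infix_iff] at h ⊢; simpa using h

theorem loop_eq_chk (cs : List Char) (q : Bool) : isqLoop cs q = chk (cs.splitOn '"') q := by
  induction cs generalizing q with
  | nil => simp [isqLoop, List.splitOn, List.splitOnP_nil, chk]
  | cons c rest ih =>
    rw [show (c :: rest).splitOn '"' =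
        if c == '"' then [] :: rest.splitOn '"' else (rest.splitOn '"').modifyHead (c :: ·) from by
      simp [List.splitOn, List.splitOnP_cons]]
    by_cases hc : c = '"'
    · subst hc; simp [isqLoop, chk, ih]
    · obtain ⟨h, t, hht⟩ : ∃ h t, rest.splitOn '"' = h :: t := by
        rcases e : rest.splitOn '"' with _ | ⟨h, t⟩
        · exact absurd e (by unfold List.splitOn; exact List.splitOnP_ne_nil _ _)
        · exact ⟨h, t, rfl⟩
      simp only [hc, beq_iff_eq, if_false, hht, List.modifyHead]
      by_cases hd : c = '.'
      · subst hd
        cases q <;> simp [isqLoop, chk, ih, hht]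
      · have hd' : ('.' : Char) ≠ c := fun e => hd e.symm
        simp [isqLoop, chk, ih, hht, hd, hd', hc]

theorem chk_eq_enum (parts : List (List Char)) (n : Int) :
    chk parts (n % 2 == 1) =
      (PySem.List.enumerate parts n).any (fun p => p.1 % 2 == 0 && p.2.contains '.') := by
  induction parts generalizing n with
  | nil => simp [chk, PySem.List.enumerate]
  | cons s rest ih =>
    have h2 : n % 2 = 0 ∨ n % 2 = 1 := Int.emod_two_eq n
    have h1 : (!(n % 2 == 1)) = (n % 2 == 0) := by rcases h2 with h|h <;> simp [h]
    have h3 : ((n + 1) % 2 == 1) = (!(n % 2 == 1)) := by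
      rcases h2 with h|h <;> simp [Int.add_emod, h]
    rw [show PySem.List.enumerate (s :: rest) n = (n, s) :: PySem.List.enumerate rest (n + 1) from rfl]
    simp only [chk, List.any_cons, ← ih, h3, h1]

theorem is_schema_qualified_spec : Claim_equal_is_schema_qualified := by
  intro identifier _
  unfold Spec_is_schema_qualified is_schema_qualified is_schema_qualified_alt
  simp only [isIn_dot]
  rw [loop_eq_chk]
  have h := chk_eq_enum ((PySem.Str.strip identifier).toList.splitOn '"') 0
  simpa using h
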